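-- pv_equiv track=rewrite | github.com/SunwoongH/algorithm | Programmers/PCCP/석유 시추.py | solution
-- ===== SOURCE A (Python) =====
-- from collections import deque
--
-- move = [(1, 0), (-1, 0), (0, -1), (0, 1)]
--
-- def bfs(s_r, s_c, visited, land, land_table, k):
--     queue = deque([(s_r, s_c)])
--     path = []
--     visited[s_r][s_c] = True
--
--     while queue:
--         r, c = queue.popleft()
--
--         path.append((r, c))
--
--         for oper in move:
--             dr = r + oper[0]
--             dc = c + oper[1]
--             if 0 <= dr < len(land) and 0 <= dc < len(land[0]):
--                 if not visited[dr][dc] and land[dr][dc]: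
--                     visited[dr][dc] = True
--                     queue.append((dr, dc))
--
--     for r, c in path:
--         land_table[(r, c)] = (len(path), k)
--
-- def solution(land):
--     visited = [[False for _ in range(len(land[0]))] for _ in range(len(land))]
--     land_table = dict()
--     answer = 0
--
--     flag = 1
--
--     for r in range(len(land)):
--         for c in range(len(land[0])):
--             if not visited[r][c] and land[r][c]:
--                 bfs(r, c, visited, land, land_table, flag)
--                 flag += 1
--
--     for c in range(len(land[0])):
--         seen = set()
--         for r in range(len(land)):
--             if (r, c) in land_table:
--                 if land_table[(r, c)] not in seen:
--                     seen.add(land_table[(r, c)])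
--         answer = max(sum([cost for cost, _ in seen]), answer)
--
--     return answer
-- ===== SOURCE B (Python) =====
-- def solution(land):
--     rows, cols = len(land), len(land[0])
--     comp_id = {}          # cell -> component index (marks cells, replaces the visited matrix)
--     comp_cells = []       # cells of each component, in discovery order
--     for r in range(rows):
--         for c in range(cols):
--             if land[r][c] and (r, c) not in comp_id:
--                 k = len(comp_cells)
--                 comp_id[(r, c)] = k
--                 stack = [(r, c)]
--                 cells = []
--                 while stack:
--                     cr, cc = stack.pop()
--                     cells.append((cr, cc))
--                     for nr, nc in ((cr + 1, cc), (cr - 1, cc), (cr, cc - 1), (cr, cc + 1)):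
--                         if 0 <= nr < rows and 0 <= nc < cols and land[nr][nc] and (nr, nc) not in comp_id:
--                             comp_id[(nr, nc)] = k
--                             stack.append((nr, nc))
--                 comp_cells.append(cells)
--     col_total = [0] * cols
--     for cells in comp_cells:
--         size = len(cells)
--         for c in {cc for _, cc in cells}:
--             col_total[c] += size
--     return max(col_total, default=0)
-- ===== Notes on version B (the rewrite author's own statement) =====
-- stated objective: alternative
-- what changed: A's BFS flood-fill (deque, visited boolean matrix, per-cell dict of (size,flag) pairs, then a per-column scan collecting a set of seen pairs) is replaced by a stack DFS that marks cells in a comp_id dict, collects each component's cell list once, and then adds each component's size to a per-column totals array over the component's distinct columns, taking max(col_total, default=0).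
import Mathlib
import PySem

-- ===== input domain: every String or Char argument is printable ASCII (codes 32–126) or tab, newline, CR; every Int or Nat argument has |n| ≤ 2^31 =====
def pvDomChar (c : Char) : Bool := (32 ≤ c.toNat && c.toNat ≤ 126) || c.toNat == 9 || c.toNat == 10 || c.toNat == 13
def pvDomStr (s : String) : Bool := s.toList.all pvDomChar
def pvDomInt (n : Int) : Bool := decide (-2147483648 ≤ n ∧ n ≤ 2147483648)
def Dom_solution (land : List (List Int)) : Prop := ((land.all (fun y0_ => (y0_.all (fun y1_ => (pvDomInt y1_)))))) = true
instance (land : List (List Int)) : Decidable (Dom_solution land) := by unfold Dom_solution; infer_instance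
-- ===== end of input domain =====

-- B replaces A's BFS flood-fill + per-cell dict + per-column seen-set scan by a stack DFS marking cells
-- in a dict and a component-centric column-total array (objective: alternative; same asymptotic cost).

-- ===== PORT A =====
-- helpers for the port of A (the Python bfs with its `move` table and the visited matrix)

def moveA : List (Int × Int) := [(1, 0), (-1, 0), (0, -1), (0, 1)]

-- visited[r][c] (read): Python raises on an out-of-range index; along every execution reached from
-- `solution` the indices are in range of `visited`, so the Option is always `some` there.
def vget (vis : List (List Bool)) (r c : Int) : Option Bool :=
  (PySem.List.pyGet? vis r).bind fun row => PySem.List.pyGet? row c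

-- visited[r][c] = v (write)
def vset (vis : List (List Bool)) (r c : Int) (v : Bool) : List (List Bool) :=
  PySem.List.pySetD vis r (PySem.List.pySetD (PySem.List.pyGetD vis r []) c v)

-- land[r][c] (always guarded in range by A's bounds test)
def landAt (land : List (List Int)) (r c : Int) : Int :=
  PySem.List.pyGetD (PySem.List.pyGetD land r []) c 0

-- body of A's `for oper in move` loop: maybe push one neighbour and mark it visited
def bfsStep (land : List (List Int)) (r c : Int)
    (st : List (Int × Int) × List (List Bool)) (oper : Int × Int) :
    List (Int × Int) × List (List Bool) :=
  if 0 ≤ r + oper.1 ∧ r + oper.1 < (land.length : Int) ∧ 0 ≤ c + oper.2 ∧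
      c + oper.2 < ((PySem.List.pyGetD land 0 []).length : Int) then
    if vget st.2 (r + oper.1) (c + oper.2) = some false ∧ landAt land (r + oper.1) (c + oper.2) ≠ 0 then
      (st.1 ++ [(r + oper.1, c + oper.2)], vset st.2 (r + oper.1) (c + oper.2) true)
    else st
  else st

-- number of still-unvisited entries: termination measure of A's while loop
def falseCount (vis : List (List Bool)) : Nat := (vis.map (fun row => row.count false)).sum

theorem count_false_set (row : List Bool) (m : Nat) (h : row[m]? = some false) :
    (row.set m true).count false + 1 = row.count false := by
  induction row generalizing m with
  | nil => simp at h
  | cons b t ih =>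
    cases m with
    | zero => simp_all
    | succ m =>
      simp only [List.getElem?_cons_succ] at h
      cases b <;> simp [ih m h]

theorem falseCount_set_lt (vis : List (List Bool)) (n : Nat) (row newRow : List Bool)
    (h : vis[n]? = some row) (hlt : newRow.count false < row.count false) :
    falseCount (vis.set n newRow) < falseCount vis := by
  induction vis generalizing n with
  | nil => simp at h
  | cons r t ih =>
    cases n with
    | zero =>
      simp only [List.getElem?_cons_zero, Option.some.injEq] at h
      subst h
      simp [falseCount]; omega
    | succ n =>
      simp only [List.getElem?_cons_succ] at h
      have := ih n h
      simp only [falseCount, List.set_cons_succ, List.map_cons, List.sum_cons] at *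
      omega

theorem vget_natCast (vis : List (List Bool)) (n m : Nat) :
    vget vis (n : Int) (m : Int) = vis[n]?.bind fun row => row[m]? := by
  simp [vget, PySem.List.pyGet?_natCast]

theorem falseCount_vset_lt (vis : List (List Bool)) {r c : Int} (hr : 0 ≤ r) (hc : 0 ≤ c)
    (h : vget vis r c = some false) : falseCount (vset vis r c true) < falseCount vis := by
  obtain ⟨n, rfl⟩ : ∃ n : Nat, r = (n : Int) := ⟨r.toNat, (Int.toNat_of_nonneg hr).symm⟩
  obtain ⟨m, rfl⟩ : ∃ m : Nat, c = (m : Int) := ⟨c.toNat, (Int.toNat_of_nonneg hc).symm⟩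
  rw [vget_natCast] at h
  obtain ⟨row, hrow, hfalse⟩ : ∃ row, vis[n]? = some row ∧ row[m]? = some false := by
    cases hv : vis[n]? with
    | none => simp [hv] at h
    | some row => exact ⟨row, rfl, by simpa [hv] using h⟩
  have hset : vset vis (n : Int) (m : Int) true = vis.set n (row.set m true) := by
    have hgd : PySem.List.pyGetD vis (n : Int) [] = row := by
      rw [PySem.List.pyGetD_of_nonneg vis [] (by positivity)]
      simp [List.getD, hrow]
    rw [vset, hgd, PySem.List.pySetD_of_nonneg _ _ (by positivity),
      PySem.List.pySetD_of_nonneg _ _ (by positivity)]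
    simp
  rw [hset]
  exact falseCount_set_lt vis n row _ hrow (by have := count_false_set row m hfalse; omega)

theorem bfsStep_measure (land : List (List Int)) (r c : Int)
    (st : List (Int × Int) × List (List Bool)) (oper : Int × Int) :
    2 * falseCount (bfsStep land r c st oper).2 + (bfsStep land r c st oper).1.length
      ≤ 2 * falseCount st.2 + st.1.length := by
  unfold bfsStep
  split_ifs with h1 h2
  · have := falseCount_vset_lt st.2 h1.1 h1.2.2.1 h2.1
    simp only [List.length_append, List.length_singleton]
    omega
  · exact le_refl _
  · exact le_refl _

theorem bfsFold_measure (land : List (List Int)) (r c : Int) (opers : List (Int × Int)) :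
    ∀ st : List (Int × Int) × List (List Bool),
      2 * falseCount ((opers.foldl (bfsStep land r c) st)).2
        + ((opers.foldl (bfsStep land r c) st)).1.length
      ≤ 2 * falseCount st.2 + st.1.length := by
  induction opers with
  | nil => intro st; simp
  | cons o t ih =>
    intro st
    calc 2 * falseCount ((t.foldl (bfsStep land r c) (bfsStep land r c st o))).2
          + ((t.foldl (bfsStep land r c) (bfsStep land r c st o))).1.length
        ≤ 2 * falseCount (bfsStep land r c st o).2 + (bfsStep land r c st o).1.length :=
          ih (bfsStep land r c st o)
      _ ≤ 2 * falseCount st.2 + st.1.length := bfsStep_measure land r c st o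

-- A's `while queue:` loop; returns (visited, path)
def bfsLoop (land : List (List Int)) (q : List (Int × Int)) (vis : List (List Bool))
    (path : List (Int × Int)) : List (List Bool) × List (Int × Int) :=
  match q with
  | [] => (vis, path)
  | (r, c) :: rest =>
    bfsLoop land (moveA.foldl (bfsStep land r c) (rest, vis)).1
      (moveA.foldl (bfsStep land r c) (rest, vis)).2 (path ++ [(r, c)])
termination_by 2 * falseCount vis + q.length
decreasing_by
  have := bfsFold_measure land r c moveA (rest, vis)
  simp only [List.length_cons] at this ⊢
  omega

-- Python's bfs: returns the updated (visited, land_table)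
def bfsA (land : List (List Int)) (s_r s_c : Int) (visited : List (List Bool))
    (land_table : PySem.Dict (Int × Int) (Int × Int)) (k : Int) :
    List (List Bool) × PySem.Dict (Int × Int) (Int × Int) :=
  let res := bfsLoop land [(s_r, s_c)] (vset visited s_r s_c true) []
  (res.1, res.2.foldl (fun t p => t.insert p ((res.2.length : Int), k)) land_table)

def solution (land : List (List Int)) : Int :=
  -- len(land[0]): Python raises IndexError on empty land; excluded by Pre_solution
  let rows : Int := (land.length : Int)
  let cols : Int := ((PySem.List.pyGetD land 0 []).length : Int)
  let visited0 : List (List Bool) :=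
    (PySem.List.pyRange 0 rows).map fun _ => (PySem.List.pyRange 0 cols).map fun _ => false
  let st := (PySem.List.pyRange 0 rows).foldl (fun st r =>
    (PySem.List.pyRange 0 cols).foldl (fun st c =>
      if vget st.1 r c = some false ∧ landAt land r c ≠ 0 then
        ((bfsA land r c st.1 st.2.1 st.2.2).1, (bfsA land r c st.1 st.2.1 st.2.2).2, st.2.2 + 1)
      else st) st)
    (visited0, (PySem.Dict.empty : PySem.Dict (Int × Int) (Int × Int)), (1 : Int))
  (PySem.List.pyRange 0 cols).foldl (fun answer c =>
    max ((((PySem.List.pyRange 0 rows).foldl (fun seen r =>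
        match st.2.1.get? (r, c) with
        | some v => if v ∈ seen then seen else PySem.Set.add seen v
        | none => seen) (PySem.Set.empty : PySem.Set (Int × Int))).map Prod.fst).sum) answer) 0

-- ===== PORT B =====
-- helpers for the port of B (stack DFS over a comp_id dict, then per-component column totals)

-- land[p[0]][p[1]] (B's guards keep it in range wherever Python B reads it)
def landB (land : List (List Int)) (p : Int × Int) : Int :=
  PySem.List.pyGetD (PySem.List.pyGetD land p.1 []) p.2 0

-- the four neighbours, in Source B's tuple order
def nbrsB (p : Int × Int) : List (Int × Int) :=
  [(p.1 + 1, p.2), (p.1 - 1, p.2), (p.1, p.2 - 1), (p.1, p.2 + 1)]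

-- body of B's neighbour loop: claim an unclaimed in-range oil neighbour for component k
def dfsStep (land : List (List Int)) (rows cols k : Int)
    (st : List (Int × Int) × PySem.Dict (Int × Int) Int) (nb : Int × Int) :
    List (Int × Int) × PySem.Dict (Int × Int) Int :=
  if 0 ≤ nb.1 ∧ nb.1 < rows ∧ 0 ≤ nb.2 ∧ nb.2 < cols ∧ landB land nb ≠ 0 ∧
      st.2.contains nb = false then
    (st.1 ++ [nb], st.2.insert nb k)
  else st

-- all in-range cells; only used for the termination measure of B's while loop
def cellsB (rows cols : Int) : List (Int × Int) :=
  (PySem.List.pyRange 0 rows).flatMap fun i => (PySem.List.pyRange 0 cols).map fun j => (i, j)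

def unmarked (rows cols : Int) (d : PySem.Dict (Int × Int) Int) : Nat :=
  (cellsB rows cols).countP fun p => !d.contains p

theorem nodup_cellsB (rows cols : Int) : (cellsB rows cols).Nodup := by
  unfold cellsB
  rw [List.nodup_flatMap]
  refine ⟨fun i _ => ?_, ?_⟩
  · refine List.Nodup.map ?_ (PySem.List.nodup_pyRange_one 0 cols)
    intro a b h
    simpa using congrArg Prod.snd h
  refine List.Pairwise.imp_of_mem ?_ ((PySem.List.nodup_pyRange_one 0 rows))
  intro i j _ _ hne p hp hq
  simp only [List.mem_map] at hp hq
  obtain ⟨a, _, rfl⟩ := hp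
  obtain ⟨b, _, hb⟩ := hq
  have hji : j = i := congrArg Prod.fst hb
  exact hne hji.symm

theorem mem_cellsB {rows cols : Int} {p : Int × Int}
    (h1 : 0 ≤ p.1) (h2 : p.1 < rows) (h3 : 0 ≤ p.2) (h4 : p.2 < cols) : p ∈ cellsB rows cols := by
  unfold cellsB
  simp only [List.mem_flatMap, List.mem_map]
  exact ⟨p.1, by simp [PySem.List.mem_pyRange_one, h1, h2],
    ⟨p.2, by simp [PySem.List.mem_pyRange_one, h3, h4]⟩⟩

theorem countP_lt_of_flip {α : Type} {l : List α} {f g : α → Bool} {x : α}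
    (hnd : l.Nodup) (hx : x ∈ l) (hf : f x = true) (hg : g x = false)
    (hcong : ∀ y ∈ l, y ≠ x → g y = f y) : l.countP g < l.countP f := by
  obtain ⟨s, t, rfl⟩ := List.append_of_mem hx
  have hxs : x ∉ s := fun hmem => List.disjoint_of_nodup_append hnd hmem (by simp)
  have hxt : x ∉ t := by
    have := List.Nodup.of_append_right hnd
    simp only [List.nodup_cons] at this
    exact this.1
  have hs : s.countP g = s.countP f :=
    List.countP_congr (fun y hy => by rw [hcong y (by simp [hy]) (fun h => hxs (h ▸ hy))])
  have ht : t.countP g = t.countP f :=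
    List.countP_congr (fun y hy => by rw [hcong y (by simp [hy]) (fun h => hxt (h ▸ hy))])
  simp [List.countP_append, hs, ht, hf, hg]

theorem dfsStep_measure (land : List (List Int)) (rows cols k : Int)
    (st : List (Int × Int) × PySem.Dict (Int × Int) Int) (nb : Int × Int) :
    2 * unmarked rows cols (dfsStep land rows cols k st nb).2
      + (dfsStep land rows cols k st nb).1.length
      ≤ 2 * unmarked rows cols st.2 + st.1.length := by
  unfold dfsStep
  split_ifs with h
  · obtain ⟨h1, h2, h3, h4, _, h6⟩ := h
    have hlt : unmarked rows cols (st.2.insert nb k) < unmarked rows cols st.2 := by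
      apply countP_lt_of_flip (nodup_cellsB rows cols) (mem_cellsB h1 h2 h3 h4)
      · simp [h6]
      · simp
      · intro y _ hy
        simp [PySem.Dict.contains_insert, hy]
    simp only [List.length_append, List.length_singleton]
    omega
  · exact le_refl _

theorem dfsFold_measure (land : List (List Int)) (rows cols k : Int) (nbs : List (Int × Int)) :
    ∀ st : List (Int × Int) × PySem.Dict (Int × Int) Int,
      2 * unmarked rows cols ((nbs.foldl (dfsStep land rows cols k) st)).2
        + ((nbs.foldl (dfsStep land rows cols k) st)).1.length
      ≤ 2 * unmarked rows cols st.2 + st.1.length := by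
  induction nbs with
  | nil => intro st; simp
  | cons o t ih =>
    intro st
    exact le_trans (ih (dfsStep land rows cols k st o)) (dfsStep_measure land rows cols k st o)

-- B's `while stack:` loop; pops from the END of the stack; returns (comp_id, cells)
def dfsLoop (land : List (List Int)) (rows cols k : Int) (stack : List (Int × Int))
    (d : PySem.Dict (Int × Int) Int) (cells : List (Int × Int)) :
    PySem.Dict (Int × Int) Int × List (Int × Int) :=
  match hs : stack.getLast? with
  | none => (d, cells)
  | some p =>
    dfsLoop land rows cols k
      ((nbrsB p).foldl (dfsStep land rows cols k) (stack.dropLast, d)).1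
      ((nbrsB p).foldl (dfsStep land rows cols k) (stack.dropLast, d)).2 (cells ++ [p])
termination_by 2 * unmarked rows cols d + stack.length
decreasing_by
  have hne : stack ≠ [] := by
    intro h; subst h; simp at hs
  have hlen : stack.dropLast.length + 1 = stack.length := by
    have := List.length_pos_iff.mpr hne
    simp [List.length_dropLast]; omega
  have := dfsFold_measure land rows cols k (nbrsB p) (stack.dropLast, d)
  simp only [] at this ⊢
  omega

def solution_alt (land : List (List Int)) : Int :=
  -- len(land[0]): Python raises IndexError on empty land; excluded by Pre_solution
  let rows : Int := (land.length : Int)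
  let cols : Int := ((PySem.List.pyGetD land 0 []).length : Int)
  let st := (PySem.List.pyRange 0 rows).foldl (fun st r =>
    (PySem.List.pyRange 0 cols).foldl (fun st c =>
      if landB land (r, c) ≠ 0 ∧ st.1.contains (r, c) = false then
        ((dfsLoop land rows cols (st.2.length : Int) [(r, c)]
            (st.1.insert (r, c) (st.2.length : Int)) []).1,
          st.2 ++ [(dfsLoop land rows cols (st.2.length : Int) [(r, c)]
            (st.1.insert (r, c) (st.2.length : Int)) []).2])
      else st) st)
    ((PySem.Dict.empty : PySem.Dict (Int × Int) Int), ([] : List (List (Int × Int))))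
  -- col_total = [0]*cols, then size added at each distinct column of each component; order-independent
  let colTotal := st.2.foldl (fun ct cells =>
      (PySem.Set.ofList (cells.map Prod.snd)).foldl
        (fun ct c => PySem.List.pySetD ct c (PySem.List.pyGetD ct c 0 + (cells.length : Int))) ct)
    (PySem.List.pyRepeat [(0 : Int)] cols)
  match PySem.List.max? colTotal (fun x => x) with
  | some m => m
  | none => 0

-- ===== PRECONDITION & SPEC =====
-- Pre_ excludes exactly the inputs where Python A raises IndexError: the empty grid (len(land[0])),
-- and grids where some row is shorter than row 0 (land[r][c] is read for every r and c < len(land[0])).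
def Pre_solution (land : List (List Int)) : Prop :=
  land ≠ [] ∧ ∀ row ∈ land, (land.headD []).length ≤ row.length

instance (land : List (List Int)) : Decidable (Pre_solution land) := by
  unfold Pre_solution; infer_instance

def pvWitness_solution : List (List Int) := [[1, 0, 1], [1, 1, 0]]

def Spec_solution (land : List (List Int)) (out : Int) : Prop := out = solution_alt land
instance (land : List (List Int)) (out : Int) : Decidable (Spec_solution land out) := by
  unfold Spec_solution; infer_instance

-- ===== CLAIM (what is proved, stated in full; the proofs are below) =====
def Claim_equal_solution : Prop :=
  ∀ (land : List (List Int)), Dom_solution land → Pre_solution land →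
    Spec_solution land (solution land)

-- ===== LEMMAS AND PROOFS =====

-- ---- generic fold lemmas ----

theorem foldl_pair_inv {α β γ : Type} (l : List γ) (fA : α → γ → α) (fB : β → γ → β)
    (P : α → β → Prop) (h : ∀ a b x, x ∈ l → P a b → P (fA a x) (fB b x)) :
    ∀ a b, P a b → P (l.foldl fA a) (l.foldl fB b) := by
  induction l with
  | nil => intro a b hab; exact hab
  | cons x t ih =>
    intro a b hab
    exact ih (fun a b y hy => h a b y (by simp [hy])) _ _ (h a b x (by simp) hab)

-- ---- the grid abstraction: good cells, adjacency, reachability ----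

-- a cell that A's and B's flood guards accept: in range and with nonzero oil value
def Good (land : List (List Int)) (p : Int × Int) : Prop :=
  0 ≤ p.1 ∧ p.1 < (land.length : Int) ∧ 0 ≤ p.2 ∧
    p.2 < ((PySem.List.pyGetD land 0 []).length : Int) ∧ landB land p ≠ 0

-- one admissible flood move, avoiding the already-marked set M
def StepR (land : List (List Int)) (M : Set (Int × Int)) (a b : Int × Int) : Prop :=
  b ∈ nbrsB a ∧ Good land b ∧ b ∉ M

theorem reach_good {land : List (List Int)} {M : Set (Int × Int)} {s p : Int × Int}
    (hs : Good land s) (h : Relation.ReflTransGen (StepR land M) s p) : Good land p := by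
  induction h with
  | refl => exact hs
  | tail _ hst _ => exact hst.2.1

theorem reach_notM {land : List (List Int)} {M : Set (Int × Int)} {s p : Int × Int}
    (hs : s ∉ M) (h : Relation.ReflTransGen (StepR land M) s p) : p ∉ M := by
  induction h with
  | refl => exact hs
  | tail _ hst _ => exact hst.2.2

theorem moveA_map_eq (r c : Int) :
    moveA.map (fun o => (r + o.1, c + o.2)) = nbrsB (r, c) := by
  simp [moveA, nbrsB]
  omega

-- ---- reading and writing the visited matrix ----

def VisShape (land : List (List Int)) (vis : List (List Bool)) : Prop :=
  vis.length = land.length ∧ ∀ row ∈ vis, row.length = (PySem.List.pyGetD land 0 []).length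

theorem vget_nonneg (vis : List (List Bool)) {r c : Int} (hr : 0 ≤ r) (hc : 0 ≤ c) :
    vget vis r c = vis[r.toNat]?.bind fun row => row[c.toNat]? := by
  obtain ⟨n, rfl⟩ : ∃ n : Nat, r = (n : Int) := ⟨r.toNat, (Int.toNat_of_nonneg hr).symm⟩
  obtain ⟨m, rfl⟩ : ∃ m : Nat, c = (m : Int) := ⟨c.toNat, (Int.toNat_of_nonneg hc).symm⟩
  simpa using vget_natCast vis n m

theorem vget_total {land : List (List Int)} {vis : List (List Bool)} (hsh : VisShape land vis)
    {r c : Int} (hr1 : 0 ≤ r) (hr2 : r < (land.length : Int)) (hc1 : 0 ≤ c)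
    (hc2 : c < ((PySem.List.pyGetD land 0 []).length : Int)) :
    ∃ b, vget vis r c = some b := by
  rw [vget_nonneg vis hr1 hc1]
  have hrn : r.toNat < vis.length := by have := hsh.1; omega
  obtain ⟨row, hrow⟩ : ∃ row, vis[r.toNat]? = some row := ⟨_, List.getElem?_eq_getElem hrn⟩
  have hrmem : row ∈ vis := List.mem_of_getElem? hrow
  have hcn : c.toNat < row.length := by
    have := hsh.2 row hrmem; omega
  exact ⟨row[c.toNat], by simp [hrow, List.getElem?_eq_getElem hcn]⟩

theorem vset_eq (vis : List (List Bool)) {r c : Int} (hr : 0 ≤ r) (hc : 0 ≤ c) (v : Bool) :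
    vset vis r c v = vis.set r.toNat ((vis.getD r.toNat []).set c.toNat v) := by
  rw [vset, PySem.List.pyGetD_of_nonneg _ _ hr, PySem.List.pySetD_of_nonneg _ _ hc,
    PySem.List.pySetD_of_nonneg _ _ hr]

theorem shape_vset {land : List (List Int)} {vis : List (List Bool)} (hsh : VisShape land vis)
    {r c : Int} (hr : 0 ≤ r) (hc : 0 ≤ c) (v : Bool) :
    VisShape land (vset vis r c v) := by
  rw [vset_eq vis hr hc v]
  by_cases hlt : r.toNat < vis.length
  · refine ⟨by simp [hsh.1], ?_⟩
    intro row hrow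
    rcases List.mem_or_eq_of_mem_set hrow with h | h
    · exact hsh.2 row h
    · subst h
      simp only [List.length_set]
      rw [List.getD_eq_getElem _ _ hlt]
      exact hsh.2 _ (List.getElem_mem hlt)
  · rw [List.set_eq_of_length_le (by omega)]
    exact hsh

theorem vget_vset {vis : List (List Bool)} {r c : Int} (hr : 0 ≤ r) (hc : 0 ≤ c) {b₀ : Bool}
    (hsome : vget vis r c = some b₀) (v : Bool) {x y : Int} (hx : 0 ≤ x) (hy : 0 ≤ y) :
    vget (vset vis r c v) x y = if x = r ∧ y = c then some v else vget vis x y := by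
  obtain ⟨n, rfl⟩ : ∃ n : Nat, r = (n : Int) := ⟨r.toNat, (Int.toNat_of_nonneg hr).symm⟩
  obtain ⟨m, rfl⟩ : ∃ m : Nat, c = (m : Int) := ⟨c.toNat, (Int.toNat_of_nonneg hc).symm⟩
  obtain ⟨xn, rfl⟩ : ∃ xn : Nat, x = (xn : Int) := ⟨x.toNat, (Int.toNat_of_nonneg hx).symm⟩
  obtain ⟨ym, rfl⟩ : ∃ ym : Nat, y = (ym : Int) := ⟨y.toNat, (Int.toNat_of_nonneg hy).symm⟩
  rw [vget_natCast] at hsome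
  obtain ⟨row, hrow, hcm⟩ : ∃ row, vis[n]? = some row ∧ row[m]? = some b₀ := by
    cases hv : vis[n]? with
    | none => simp [hv] at hsome
    | some row => exact ⟨row, rfl, by simpa [hv] using hsome⟩
  have hn : n < vis.length := (List.getElem?_eq_some_iff.mp hrow).1
  have hm : m < row.length := (List.getElem?_eq_some_iff.mp hcm).1
  have hgd : vis.getD n [] = row := by
    rw [List.getD_eq_getElem _ _ hn]
    have := List.getElem?_eq_getElem hn
    rw [this] at hrow; exact (Option.some.injEq _ _).mp hrow
  rw [vset_eq vis (r := (n : Int)) (c := (m : Int)) (by positivity) (by positivity) v,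
    vget_natCast, vget_natCast]
  simp only [Int.toNat_natCast, hgd]
  by_cases hxn : xn = n
  · subst hxn
    rw [List.getElem?_set_self' ]
    by_cases hym : ym = m
    · subst hym
      simp [List.getElem?_eq_getElem, hn, hm, List.getElem?_set_self', hrow]
    · simp only [Nat.cast_inj]
      rw [if_neg (by tauto)]
      have h2 : (row.set m v)[ym]? = row[ym]? := List.getElem?_set_ne (by omega)
      obtain ⟨_, he⟩ := List.getElem?_eq_some_iff.mp hrow
      simp [List.getElem?_eq_getElem hn, h2, he]
  · rw [List.getElem?_set_ne (by omega)]
    rw [if_neg (by simp; omega)]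

-- ---- A's flood fill: one-cell expansion, then the whole BFS loop ----

theorem bfsFold_spec (land : List (List Int)) (r c : Int) (opers : List (Int × Int)) :
    ∀ (q₀ : List (Int × Int)) (vis : List (List Bool)), VisShape land vis →
    ∃ new : List (Int × Int),
      (opers.foldl (bfsStep land r c) (q₀, vis)).1 = q₀ ++ new ∧
      VisShape land (opers.foldl (bfsStep land r c) (q₀, vis)).2 ∧
      new.Nodup ∧
      (∀ p : Int × Int, 0 ≤ p.1 → 0 ≤ p.2 →
        ((vget (opers.foldl (bfsStep land r c) (q₀, vis)).2 p.1 p.2 = some true) ↔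
          (vget vis p.1 p.2 = some true ∨ p ∈ new))) ∧
      (∀ p ∈ new, p ∈ opers.map (fun o => (r + o.1, c + o.2)) ∧ Good land p ∧
        vget vis p.1 p.2 ≠ some true) ∧
      (∀ o ∈ opers, Good land (r + o.1, c + o.2) →
        vget (opers.foldl (bfsStep land r c) (q₀, vis)).2 (r + o.1) (c + o.2) = some true) := by
  induction opers with
  | nil =>
    intro q₀ vis hsh
    exact ⟨[], by simp, hsh, by simp, by simp, by simp, by simp⟩
  | cons o t ih =>
    intro q₀ vis hsh
    by_cases hb : 0 ≤ r + o.1 ∧ r + o.1 < (land.length : Int) ∧ 0 ≤ c + o.2 ∧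
        c + o.2 < ((PySem.List.pyGetD land 0 []).length : Int)
    · by_cases hg : vget vis (r + o.1) (c + o.2) = some false ∧ landAt land (r + o.1) (c + o.2) ≠ 0
      · -- the neighbour is pushed and marked
        have hstep : bfsStep land r c (q₀, vis) o =
            (q₀ ++ [(r + o.1, c + o.2)], vset vis (r + o.1) (c + o.2) true) := by
          unfold bfsStep; rw [if_pos hb, if_pos hg]
        have hsh' : VisShape land (vset vis (r + o.1) (c + o.2) true) :=
          shape_vset hsh hb.1 hb.2.2.1 true
        obtain ⟨new', happ, hshape, hnnodup, hnmark, hnew, hcover⟩ :=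
          ih (q₀ ++ [(r + o.1, c + o.2)]) _ hsh'
        have hupd : ∀ p : Int × Int, 0 ≤ p.1 → 0 ≤ p.2 →
            vget (vset vis (r + o.1) (c + o.2) true) p.1 p.2 =
              if p.1 = r + o.1 ∧ p.2 = c + o.2 then some true else vget vis p.1 p.2 :=
          fun p h1 h2 => vget_vset hb.1 hb.2.2.1 hg.1 true h1 h2
        have hynn1 : (0 : Int) ≤ r + o.1 := hb.1
        have hynn2 : (0 : Int) ≤ c + o.2 := hb.2.2.1
        have hgoody : Good land (r + o.1, c + o.2) :=
          ⟨hb.1, hb.2.1, hb.2.2.1, hb.2.2.2, hg.2⟩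
        have hyset : vget (vset vis (r + o.1) (c + o.2) true) (r + o.1) (c + o.2) = some true := by
          rw [hupd (r + o.1, c + o.2) hynn1 hynn2]; simp
        refine ⟨(r + o.1, c + o.2) :: new', ?_, ?_, ?_, ?_, ?_, ?_⟩
        · simp only [List.foldl_cons, hstep, happ, List.append_assoc, List.singleton_append]
        · simpa only [List.foldl_cons, hstep] using hshape
        · refine List.nodup_cons.mpr ⟨fun hmem => ?_, hnnodup⟩
          exact (hnew _ hmem).2.2 hyset
        · intro p h1 h2
          simp only [List.foldl_cons, hstep]
          rw [hnmark p h1 h2, hupd p h1 h2]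
          by_cases hcnd : p.1 = r + o.1 ∧ p.2 = c + o.2
          · have hp : p = (r + o.1, c + o.2) := Prod.ext_iff.mpr hcnd
            simp [hcnd, hp]
          · rw [if_neg hcnd]
            have hp : p ≠ (r + o.1, c + o.2) := fun h => hcnd (Prod.ext_iff.mp h)
            simp [hp]
        · intro p hp
          rcases List.mem_cons.mp hp with rfl | hp'
          · exact ⟨by simp, hgoody, by rw [hg.1]; simp⟩
          · obtain ⟨hm, hgd, hnt⟩ := hnew p hp'
            refine ⟨by simp only [List.map_cons]; exact List.mem_cons_of_mem _ hm, hgd, fun ht => ?_⟩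
            apply hnt
            rw [hupd p hgd.1 hgd.2.2.1]
            split_ifs with hcnd
            · rfl
            · exact ht
        · intro o' ho' hgd'
          rcases List.mem_cons.mp ho' with rfl | ho''
          · simp only [List.foldl_cons, hstep]
            exact (hnmark (r + o'.1, c + o'.2) hynn1 hynn2).mpr (Or.inl hyset)
          · simpa only [List.foldl_cons, hstep] using hcover o' ho'' hgd'
      · -- already visited or no oil: nothing happens
        have hstep : bfsStep land r c (q₀, vis) o = (q₀, vis) := by
          unfold bfsStep; rw [if_pos hb, if_neg hg]
        obtain ⟨new', happ, hshape, hnnodup, hnmark, hnew, hcover⟩ := ih q₀ vis hsh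
        refine ⟨new', by simpa only [List.foldl_cons, hstep] using happ,
          by simpa only [List.foldl_cons, hstep] using hshape, hnnodup,
          fun p h1 h2 => by simpa only [List.foldl_cons, hstep] using hnmark p h1 h2,
          fun p hp => ⟨by simp only [List.map_cons]; exact List.mem_cons_of_mem _ (hnew p hp).1,
            (hnew p hp).2.1, (hnew p hp).2.2⟩, ?_⟩
        intro o' ho' hgd'
        rcases List.mem_cons.mp ho' with rfl | ho''
        · -- good neighbour that was not pushed must already be marked true
          obtain ⟨b, hbv⟩ := vget_total hsh hgd'.1 hgd'.2.1 hgd'.2.2.1 hgd'.2.2.2.1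
          have hbt : b = true := by
            by_contra hbt
            exact hg ⟨by rw [hbv]; simp [Bool.eq_false_iff.mpr hbt], hgd'.2.2.2.2⟩
          subst hbt
          simp only [List.foldl_cons, hstep]
          exact (hnmark _ hgd'.1 hgd'.2.2.1).mpr (Or.inl hbv)
        · simpa only [List.foldl_cons, hstep] using hcover o' ho'' hgd'
    · -- out of the grid
      have hstep : bfsStep land r c (q₀, vis) o = (q₀, vis) := by
        unfold bfsStep; rw [if_neg hb]
      obtain ⟨new', happ, hshape, hnnodup, hnmark, hnew, hcover⟩ := ih q₀ vis hsh
      refine ⟨new', by simpa only [List.foldl_cons, hstep] using happ,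
        by simpa only [List.foldl_cons, hstep] using hshape, hnnodup,
        fun p h1 h2 => by simpa only [List.foldl_cons, hstep] using hnmark p h1 h2,
        fun p hp => ⟨by simp only [List.map_cons]; exact List.mem_cons_of_mem _ (hnew p hp).1,
          (hnew p hp).2.1, (hnew p hp).2.2⟩, ?_⟩
      intro o' ho' hgd'
      rcases List.mem_cons.mp ho' with rfl | ho''
      · exact absurd ⟨hgd'.1, hgd'.2.1, hgd'.2.2.1, hgd'.2.2.2.1⟩ hb
      · simpa only [List.foldl_cons, hstep] using hcover o' ho'' hgd'

-- the loop invariant of A's BFS (M = set already marked before this component started)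
def FloodInvA (land : List (List Int)) (M : Set (Int × Int)) (s : Int × Int)
    (q : List (Int × Int)) (vis : List (List Bool)) (path : List (Int × Int)) : Prop :=
  VisShape land vis ∧
  Good land s ∧
  (∀ p : Int × Int, 0 ≤ p.1 → 0 ≤ p.2 →
    (vget vis p.1 p.2 = some true ↔ (p ∈ M ∨ p ∈ path ∨ p ∈ q))) ∧
  (path ++ q).Nodup ∧
  (∀ p ∈ path ++ q, p ∉ M) ∧
  (∀ p ∈ path ++ q, Relation.ReflTransGen (StepR land M) s p) ∧
  (∀ p ∈ path, ∀ y, StepR land M p y → (y ∈ path ∨ y ∈ q)) ∧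
  s ∈ path ++ q

theorem floodA (land : List (List Int)) (M : Set (Int × Int)) (s : Int × Int) :
    ∀ (q : List (Int × Int)) (vis : List (List Bool)) (path : List (Int × Int)),
    FloodInvA land M s q vis path →
    VisShape land (bfsLoop land q vis path).1 ∧
    (∀ p : Int × Int, 0 ≤ p.1 → 0 ≤ p.2 →
      (vget (bfsLoop land q vis path).1 p.1 p.2 = some true ↔
        (p ∈ M ∨ p ∈ (bfsLoop land q vis path).2))) ∧
    (bfsLoop land q vis path).2.Nodup ∧
    (∀ p, p ∈ (bfsLoop land q vis path).2 ↔ Relation.ReflTransGen (StepR land M) s p) := by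
  intro q vis path
  induction q, vis, path using bfsLoop.induct land with
  | case1 vis path =>
    intro hinv
    obtain ⟨hsh, hsgood, hmark, hnodup, hnotM, hreach, hclosed, hstart⟩ := hinv
    simp only [bfsLoop]
    refine ⟨hsh, fun p h1 h2 => by simpa using hmark p h1 h2, by simpa using hnodup, ?_⟩
    intro p
    constructor
    · intro hp; exact hreach p (by simp [hp])
    · intro h
      induction h with
      | refl => simpa using hstart
      | tail hab hbc ihb =>
        rcases hclosed _ ihb _ hbc with h | h
        · exact h
        · simp at h
  | case2 vis path r c rest ih =>
    intro hinv
    obtain ⟨hsh, hsgood, hmark, hnodup, hnotM, hreach, hclosed, hstart⟩ := hinv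
    obtain ⟨new, happ, hshape, hnnodup, hnmark, hnew, hcover⟩ := bfsFold_spec land r c moveA rest vis hsh
    have holdmark : ∀ p ∈ path ++ (r, c) :: rest, vget vis p.1 p.2 = some true := by
      intro p hp
      have hgd := reach_good hsgood (hreach p hp)
      refine (hmark p hgd.1 hgd.2.2.1).mpr ?_
      rcases List.mem_append.mp hp with h | h
      · exact Or.inr (Or.inl h)
      · exact Or.inr (Or.inr h)
    have hdisjnew : ∀ p ∈ new, p ∉ path ++ (r, c) :: rest :=
      fun p hp hmem => (hnew p hp).2.2 (holdmark p hmem)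
    have hnewnotM : ∀ p ∈ new, p ∉ M := by
      intro p hp hM
      have hgd := (hnew p hp).2.1
      exact (hnew p hp).2.2 ((hmark p hgd.1 hgd.2.2.1).mpr (Or.inl hM))
    have hRC : Relation.ReflTransGen (StepR land M) s (r, c) := hreach _ (by simp)
    have hnewreach : ∀ p ∈ new, Relation.ReflTransGen (StepR land M) s p := by
      intro p hp
      refine hRC.tail ⟨?_, (hnew p hp).2.1, hnewnotM p hp⟩
      rw [← moveA_map_eq]
      exact (hnew p hp).1
    simp only [bfsLoop]
    apply ih
    refine ⟨hshape, hsgood, ?_, ?_, ?_, ?_, ?_, ?_⟩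
    · intro p h1 h2
      rw [hnmark p h1 h2, hmark p h1 h2, happ]
      simp only [List.mem_append, List.mem_cons, List.mem_singleton]
      tauto
    · rw [happ]
      have heq : (path ++ [(r, c)]) ++ (rest ++ new) = (path ++ (r, c) :: rest) ++ new := by
        simp
      rw [heq]
      exact List.Nodup.append hnodup hnnodup (fun a ha hb => hdisjnew a hb ha)
    · intro p hp
      rw [happ] at hp
      have hsplit : p ∈ path ++ (r, c) :: rest ∨ p ∈ new := by
        simp only [List.mem_append, List.mem_cons] at hp ⊢
        tauto
      rcases hsplit with h | h
      · exact hnotM p h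
      · exact hnewnotM p h
    · intro p hp
      rw [happ] at hp
      have hsplit : p ∈ path ++ (r, c) :: rest ∨ p ∈ new := by
        simp only [List.mem_append, List.mem_cons] at hp ⊢
        tauto
      rcases hsplit with h | h
      · exact hreach p h
      · exact hnewreach p h
    · intro p hp y hy
      rw [happ]
      rcases List.mem_append.mp hp with hmem | hmem
      · rcases hclosed p hmem y hy with h | h
        · exact Or.inl (by simp [h])
        · rcases List.mem_cons.mp h with h' | h'
          · exact Or.inl (by simp [h'])
          · exact Or.inr (by simp [h'])
      · have hprc : p = (r, c) := by simpa using hmem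
        subst hprc
        obtain ⟨hnb, hgoody, hynotM⟩ := hy
        rw [← moveA_map_eq] at hnb
        obtain ⟨o, ho, hyo⟩ := List.mem_map.mp hnb
        subst hyo
        have hcv := hcover o ho hgoody
        have := (hnmark (r + o.1, c + o.2) hgoody.1 hgoody.2.2.1).mp hcv
        rcases this with hv | hv
        · have := (hmark (r + o.1, c + o.2) hgoody.1 hgoody.2.2.1).mp hv
          rcases this with h | h | h
          · exact absurd h hynotM
          · exact Or.inl (by simp [h])
          · rcases List.mem_cons.mp h with h' | h'
            · exact Or.inl (by simp [h'])
            · exact Or.inr (by simp [h'])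
        · exact Or.inr (by simp [hv])
    · rw [happ]
      simp only [List.mem_append, List.mem_cons] at hstart ⊢
      tauto

-- ---- B's flood fill: one-cell expansion, then the whole DFS loop ----

theorem dfsStep_guard_iff (land : List (List Int)) (k : Int)
    (st : List (Int × Int) × PySem.Dict (Int × Int) Int) (nb : Int × Int) :
    (0 ≤ nb.1 ∧ nb.1 < (land.length : Int) ∧ 0 ≤ nb.2 ∧
        nb.2 < ((PySem.List.pyGetD land 0 []).length : Int) ∧ landB land nb ≠ 0 ∧
        st.2.contains nb = false) ↔ (Good land nb ∧ st.2.contains nb = false) := by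
  unfold Good; tauto

theorem dfsFold_spec (land : List (List Int)) (k : Int) (nbs : List (Int × Int)) :
    ∀ (q₀ : List (Int × Int)) (d : PySem.Dict (Int × Int) Int),
    ∃ new : List (Int × Int),
      (nbs.foldl (dfsStep land (land.length : Int)
          ((PySem.List.pyGetD land 0 []).length : Int) k) (q₀, d)).1 = q₀ ++ new ∧
      new.Nodup ∧
      (∀ p : Int × Int,
        ((nbs.foldl (dfsStep land (land.length : Int)
            ((PySem.List.pyGetD land 0 []).length : Int) k) (q₀, d)).2.contains p = true ↔
          (d.contains p = true ∨ p ∈ new))) ∧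
      (∀ p ∈ new, p ∈ nbs ∧ Good land p ∧ d.contains p = false) ∧
      (∀ y ∈ nbs, Good land y →
        (nbs.foldl (dfsStep land (land.length : Int)
            ((PySem.List.pyGetD land 0 []).length : Int) k) (q₀, d)).2.contains y = true) := by
  induction nbs with
  | nil =>
    intro q₀ d
    exact ⟨[], by simp, by simp, by simp, by simp, by simp⟩
  | cons o t ih =>
    intro q₀ d
    by_cases hgd : Good land o ∧ d.contains o = false
    · have hstep : dfsStep land (land.length : Int)
          ((PySem.List.pyGetD land 0 []).length : Int) k (q₀, d) o = (q₀ ++ [o], d.insert o k) := by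
        unfold dfsStep
        rw [if_pos ((dfsStep_guard_iff land k (q₀, d) o).mpr hgd)]
      obtain ⟨new', happ, hnnodup, hnmark, hnew, hcover⟩ := ih (q₀ ++ [o]) (d.insert o k)
      have hins : ∀ p : Int × Int, (d.insert o k).contains p = true ↔ (p = o ∨ d.contains p = true) := by
        intro p
        rw [PySem.Dict.contains_insert]
        simp
      refine ⟨o :: new', ?_, ?_, ?_, ?_, ?_⟩
      · simp only [List.foldl_cons, hstep, happ, List.append_assoc, List.singleton_append]
      · refine List.nodup_cons.mpr ⟨fun hmem => ?_, hnnodup⟩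
        exact absurd ((hins o).mpr (Or.inl rfl)) (by simp [(hnew o hmem).2.2])
      · intro p
        simp only [List.foldl_cons, hstep]
        rw [hnmark p, hins p]
        simp only [List.mem_cons]
        tauto
      · intro p hp
        rcases List.mem_cons.mp hp with rfl | hp'
        · exact ⟨by simp, hgd.1, hgd.2⟩
        · obtain ⟨hm, hgood, hnc⟩ := hnew p hp'
          refine ⟨List.mem_cons_of_mem _ hm, hgood, ?_⟩
          rcases Bool.eq_false_or_eq_true (d.contains p) with h | h
          · exact absurd ((hins p).mpr (Or.inr h)) (by simp [hnc])
          · exact h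
      · intro y hy hgood
        rcases List.mem_cons.mp hy with rfl | hy'
        · simp only [List.foldl_cons, hstep]
          exact (hnmark y).mpr (Or.inl ((hins y).mpr (Or.inl rfl)))
        · simpa only [List.foldl_cons, hstep] using hcover y hy' hgood
    · have hstep : dfsStep land (land.length : Int)
          ((PySem.List.pyGetD land 0 []).length : Int) k (q₀, d) o = (q₀, d) := by
        unfold dfsStep
        rw [if_neg (fun h => hgd ((dfsStep_guard_iff land k (q₀, d) o).mp h))]
      obtain ⟨new', happ, hnnodup, hnmark, hnew, hcover⟩ := ih q₀ d
      refine ⟨new', by simpa only [List.foldl_cons, hstep] using happ, hnnodup,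
        fun p => by simpa only [List.foldl_cons, hstep] using hnmark p,
        fun p hp => ⟨List.mem_cons_of_mem _ (hnew p hp).1, (hnew p hp).2.1, (hnew p hp).2.2⟩, ?_⟩
      intro y hy hgood
      rcases List.mem_cons.mp hy with rfl | hy'
      · have hc : d.contains y = true := by
          rcases Bool.eq_false_or_eq_true (d.contains y) with h | h
          · exact h
          · exact absurd ⟨hgood, h⟩ hgd
        simp only [List.foldl_cons, hstep]
        exact (hnmark y).mpr (Or.inl hc)
      · simpa only [List.foldl_cons, hstep] using hcover y hy' hgood

-- the loop invariant of B's DFS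
def FloodInvB (land : List (List Int)) (M : Set (Int × Int)) (s : Int × Int)
    (stack : List (Int × Int)) (d : PySem.Dict (Int × Int) Int)
    (cells : List (Int × Int)) : Prop :=
  Good land s ∧
  (∀ p : Int × Int, d.contains p = true ↔ (p ∈ M ∨ p ∈ cells ∨ p ∈ stack)) ∧
  (cells ++ stack).Nodup ∧
  (∀ p ∈ cells ++ stack, p ∉ M) ∧
  (∀ p ∈ cells ++ stack, Relation.ReflTransGen (StepR land M) s p) ∧
  (∀ p ∈ cells, ∀ y, StepR land M p y → (y ∈ cells ∨ y ∈ stack)) ∧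
  s ∈ cells ++ stack

theorem floodB (land : List (List Int)) (M : Set (Int × Int)) (s : Int × Int) (k : Int) :
    ∀ (stack : List (Int × Int)) (d : PySem.Dict (Int × Int) Int) (cells : List (Int × Int)),
    FloodInvB land M s stack d cells →
    (∀ p : Int × Int,
      ((dfsLoop land (land.length : Int) ((PySem.List.pyGetD land 0 []).length : Int) k
          stack d cells).1.contains p = true ↔
        (p ∈ M ∨ p ∈ (dfsLoop land (land.length : Int)
          ((PySem.List.pyGetD land 0 []).length : Int) k stack d cells).2))) ∧
    (dfsLoop land (land.length : Int) ((PySem.List.pyGetD land 0 []).length : Int) k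
        stack d cells).2.Nodup ∧
    (∀ p, p ∈ (dfsLoop land (land.length : Int)
        ((PySem.List.pyGetD land 0 []).length : Int) k stack d cells).2 ↔
      Relation.ReflTransGen (StepR land M) s p) := by
  intro stack d cells
  induction stack, d, cells using dfsLoop.induct land (land.length : Int)
    ((PySem.List.pyGetD land 0 []).length : Int) k with
  | case1 stack d cells hs =>
    intro hinv
    obtain ⟨hsgood, hmark, hnodup, hnotM, hreach, hclosed, hstart⟩ := hinv
    have hstack : stack = [] := by
      cases stack with
      | nil => rfl
      | cons a t => simp at hs
    subst hstack
    rw [dfsLoop.eq_def]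
    simp only [List.getLast?_nil]
    refine ⟨fun p => by simpa using hmark p, by simpa using hnodup, ?_⟩
    intro p
    constructor
    · intro hp; exact hreach p (by simp [hp])
    · intro h
      induction h with
      | refl => simpa using hstart
      | tail hab hbc ihb =>
        rcases hclosed _ ihb _ hbc with h | h
        · exact h
        · simp at h
  | case2 stack d cells p hs ih =>
    intro hinv
    obtain ⟨hsgood, hmark, hnodup, hnotM, hreach, hclosed, hstart⟩ := hinv
    obtain ⟨ys, hys⟩ := List.getLast?_eq_some_iff.mp hs
    subst hys
    have hdl : (ys ++ [p]).dropLast = ys := by simp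
    rw [dfsLoop.eq_def]
    split
    · next heq => rw [hs] at heq; cases heq
    next p₂ heq =>
    rw [hs] at heq
    injection heq with heqp
    subst heqp
    simp only [hdl]
    rw [hdl] at ih
    obtain ⟨new, happ, hnnodup, hnmark, hnew, hcover⟩ :=
      dfsFold_spec land k (nbrsB p) ys d
    have hpmem : p ∈ cells ++ (ys ++ [p]) := by simp
    have holdmark : ∀ x ∈ cells ++ (ys ++ [p]), d.contains x = true := by
      intro x hx
      refine (hmark x).mpr ?_
      simp only [List.mem_append] at hx ⊢
      tauto
    have hdisjnew : ∀ x ∈ new, x ∉ cells ++ (ys ++ [p]) := by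
      intro x hx hmem
      exact absurd (holdmark x hmem) (by simp [(hnew x hx).2.2])
    have hnewnotM : ∀ x ∈ new, x ∉ M := by
      intro x hx hM
      exact absurd ((hmark x).mpr (Or.inl hM)) (by simp [(hnew x hx).2.2])
    have hPC : Relation.ReflTransGen (StepR land M) s p := hreach _ hpmem
    have hnewreach : ∀ x ∈ new, Relation.ReflTransGen (StepR land M) s x :=
      fun x hx => hPC.tail ⟨(hnew x hx).1, (hnew x hx).2.1, hnewnotM x hx⟩
    apply ih
    refine ⟨hsgood, ?_, ?_, ?_, ?_, ?_, ?_⟩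
    · intro x
      rw [hnmark x, hmark x, happ]
      simp only [List.mem_append, List.mem_cons, List.mem_singleton]
      tauto
    · rw [happ]
      have hold : ((cells ++ (ys ++ [p])) ++ new).Nodup :=
        List.Nodup.append hnodup hnnodup (fun a ha hb => hdisjnew a hb ha)
      have hperm : ((cells ++ (ys ++ [p])) ++ new).Perm ((cells ++ [p]) ++ (ys ++ new)) := by
        refine List.perm_iff_count.mpr fun a => ?_
        simp only [List.count_append]
        omega
      exact hperm.nodup hold
    · intro x hx
      rw [happ] at hx
      have hsplit : x ∈ cells ++ (ys ++ [p]) ∨ x ∈ new := by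
        simp only [List.mem_append, List.mem_cons] at hx ⊢
        tauto
      rcases hsplit with h | h
      · exact hnotM x h
      · exact hnewnotM x h
    · intro x hx
      rw [happ] at hx
      have hsplit : x ∈ cells ++ (ys ++ [p]) ∨ x ∈ new := by
        simp only [List.mem_append, List.mem_cons] at hx ⊢
        tauto
      rcases hsplit with h | h
      · exact hreach x h
      · exact hnewreach x h
    · intro x hx y hy
      rw [happ]
      rcases List.mem_append.mp hx with hmem | hmem
      · rcases hclosed x hmem y hy with h | h
        · exact Or.inl (by simp [h])
        · rcases List.mem_append.mp h with h' | h'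
          · exact Or.inr (by simp [h'])
          · exact Or.inl (by simp [List.mem_singleton.mp h'])
      · have hxp : x = p := by simpa using hmem
        subst hxp
        obtain ⟨hnb, hgoody, hynotM⟩ := hy
        have hcv := hcover y hnb hgoody
        rcases (hnmark y).mp hcv with hv | hv
        · rcases (hmark y).mp hv with h | h | h
          · exact absurd h hynotM
          · exact Or.inl (by simp [h])
          · rcases List.mem_append.mp h with h' | h'
            · exact Or.inr (by simp [h'])
            · exact Or.inl (by simp [List.mem_singleton.mp h'])
        · exact Or.inr (by simp [hv])
    · rw [happ]
      simp only [List.mem_append, List.mem_cons, List.mem_singleton] at hstart ⊢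
      tauto

-- ---- land_table updates, component tagging ----

theorem dict_get?_foldl_insert (l : List (Int × Int)) (v : Int × Int) :
    ∀ (t : PySem.Dict (Int × Int) (Int × Int)) (x : Int × Int),
      (l.foldl (fun t p => t.insert p v) t).get? x = if x ∈ l then some v else t.get? x := by
  induction l with
  | nil => intro t x; simp
  | cons a l' ih =>
    intro t x
    rw [List.foldl_cons, ih]
    by_cases hx : x ∈ l'
    · simp [hx]
    · by_cases hxa : x = a
      · subst hxa; simp [hx, PySem.Dict.get?_insert_self]
      · simp [hx, hxa, PySem.Dict.get?_insert_of_ne _ _ hxa]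

-- the components in discovery order, numbered from i0 (A stores number i, B stores i - 1)
def tagged (KS : List (List (Int × Int))) (i0 : Int) : List (List (Int × Int) × Int) :=
  match KS with
  | [] => []
  | K :: t => (K, i0) :: tagged t (i0 + 1)

theorem tagged_append (KS : List (List (Int × Int))) (K : List (Int × Int)) :
    ∀ i0 : Int, tagged (KS ++ [K]) i0 = tagged KS i0 ++ [(K, i0 + (KS.length : Int))] := by
  induction KS with
  | nil => intro i0; simp [tagged]
  | cons K' t ih =>
    intro i0
    simp only [List.cons_append, tagged, ih (i0 + 1), List.length_cons]
    have : i0 + 1 + (t.length : Int) = i0 + ((t.length : Int) + 1) := by ring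
    simp [this]

theorem mem_tagged (KS : List (List (Int × Int))) :
    ∀ (i0 : Int), ∀ Ki ∈ tagged KS i0, Ki.1 ∈ KS := by
  induction KS with
  | nil => intro i0 Ki h; simp [tagged] at h
  | cons K t ih =>
    intro i0 Ki h
    rcases List.mem_cons.mp h with rfl | h'
    · simp
    · exact List.mem_cons_of_mem _ (ih (i0 + 1) Ki h')

theorem tagged_snd_ge (KS : List (List (Int × Int))) :
    ∀ (i0 : Int), ∀ Ki ∈ tagged KS i0, i0 ≤ Ki.2 := by
  induction KS with
  | nil => intro i0 Ki h; simp [tagged] at h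
  | cons K t ih =>
    intro i0 Ki h
    rcases List.mem_cons.mp h with rfl | h'
    · simp
    · have := ih (i0 + 1) Ki h'; omega

theorem tagged_snd_lt (KS : List (List (Int × Int))) :
    ∀ (i0 : Int), (tagged KS i0).Pairwise (fun a b => a.2 < b.2) := by
  induction KS with
  | nil => intro i0; simp [tagged]
  | cons K t ih =>
    intro i0
    refine List.pairwise_cons.mpr ⟨fun Kj hj => ?_, ih (i0 + 1)⟩
    have := tagged_snd_ge t (i0 + 1) Kj hj
    simp only []
    omega

theorem tagged_filter_map {β : Type} (p : List (Int × Int) → Bool) (f : List (Int × Int) → β)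
    (KS : List (List (Int × Int))) :
    ∀ i0 : Int, ((tagged KS i0).filter (fun Ki => p Ki.1)).map (fun Ki => f Ki.1)
      = (KS.filter p).map f := by
  induction KS with
  | nil => intro i0; simp [tagged]
  | cons K t ih =>
    intro i0
    simp only [tagged, List.filter_cons]
    by_cases hp : p K
    · simp [hp, ih (i0 + 1)]
    · simp [hp, ih (i0 + 1)]

-- ---- the coupling invariant of the two outer scans ----

structure OuterInv (land : List (List Int))
    (stA : List (List Bool) × PySem.Dict (Int × Int) (Int × Int) × Int)
    (stB : PySem.Dict (Int × Int) Int × List (List (Int × Int))) : Prop where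
  shape : VisShape land stA.1
  knodup : ∀ K ∈ stB.2, K.Nodup
  kgood : ∀ K ∈ stB.2, ∀ p ∈ K, Good land p
  markA : ∀ p : Int × Int, 0 ≤ p.1 → 0 ≤ p.2 →
    (vget stA.1 p.1 p.2 = some true ↔ ∃ K ∈ stB.2, p ∈ K)
  markB : ∀ p : Int × Int, stB.1.contains p = true ↔ ∃ K ∈ stB.2, p ∈ K
  kclosed : ∀ K ∈ stB.2, ∀ p ∈ K, ∀ y, y ∈ nbrsB p → Good land y → ∃ L ∈ stB.2, y ∈ L
  hflag : stA.2.2 = (stB.2.length : Int) + 1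
  htable : ∀ p v, stA.2.1.get? p = some v ↔
    ∃ Ki ∈ tagged stB.2 1, p ∈ Ki.1 ∧ v = ((Ki.1.length : Int), Ki.2)

theorem outer_step (land : List (List Int)) (r c : Int)
    (hr1 : 0 ≤ r) (hr2 : r < (land.length : Int)) (hc1 : 0 ≤ c)
    (hc2 : c < ((PySem.List.pyGetD land 0 []).length : Int))
    (stA : List (List Bool) × PySem.Dict (Int × Int) (Int × Int) × Int)
    (stB : PySem.Dict (Int × Int) Int × List (List (Int × Int)))
    (h : OuterInv land stA stB) :
    OuterInv land
      (if vget stA.1 r c = some false ∧ landAt land r c ≠ 0 then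
        ((bfsA land r c stA.1 stA.2.1 stA.2.2).1, (bfsA land r c stA.1 stA.2.1 stA.2.2).2,
          stA.2.2 + 1)
      else stA)
      (if landB land (r, c) ≠ 0 ∧ stB.1.contains (r, c) = false then
        ((dfsLoop land (land.length : Int) ((PySem.List.pyGetD land 0 []).length : Int)
            (stB.2.length : Int) [(r, c)] (stB.1.insert (r, c) (stB.2.length : Int)) []).1,
          stB.2 ++ [(dfsLoop land (land.length : Int) ((PySem.List.pyGetD land 0 []).length : Int)
            (stB.2.length : Int) [(r, c)] (stB.1.insert (r, c) (stB.2.length : Int)) []).2])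
      else stB) := by
  obtain ⟨b0, hb0⟩ := vget_total h.shape hr1 hr2 hc1 hc2
  have hguard : (vget stA.1 r c = some false ∧ landAt land r c ≠ 0) ↔
      (landB land (r, c) ≠ 0 ∧ stB.1.contains (r, c) = false) := by
    constructor
    · rintro ⟨hv, hl⟩
      refine ⟨hl, ?_⟩
      rcases Bool.eq_false_or_eq_true (stB.1.contains (r, c)) with hctrue | hcfalse
      · have := (h.markA (r, c) hr1 hc1).mpr ((h.markB (r, c)).mp hctrue)
        rw [hv] at this
        simp at this
      · exact hcfalse
    · rintro ⟨hl, hc⟩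
      have hbf : b0 = false := by
        by_contra hb
        have hb' : b0 = true := by cases b0 <;> simp_all
        have := (h.markB (r, c)).mpr ((h.markA (r, c) hr1 hc1).mp (hb' ▸ hb0))
        rw [this] at hc
        cases hc
      exact ⟨by rw [hb0, hbf], hl⟩
  by_cases hg : vget stA.1 r c = some false ∧ landAt land r c ≠ 0
  · rw [if_pos hg, if_pos (hguard.mp hg)]
    have hsgood : Good land (r, c) := ⟨hr1, hr2, hc1, hc2, hg.2⟩
    have hnM : ¬ ∃ K ∈ stB.2, (r, c) ∈ K := by
      intro hM
      have := (h.markA (r, c) hr1 hc1).mpr hM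
      rw [hg.1] at this
      simp at this
    have hupd : ∀ p : Int × Int, 0 ≤ p.1 → 0 ≤ p.2 →
        vget (vset stA.1 r c true) p.1 p.2 =
          if p.1 = r ∧ p.2 = c then some true else vget stA.1 p.1 p.2 :=
      fun p h1 h2 => vget_vset hr1 hc1 hg.1 true h1 h2
    have hinvA : FloodInvA land {p | ∃ K ∈ stB.2, p ∈ K} (r, c) [(r, c)]
        (vset stA.1 r c true) [] := by
      refine ⟨shape_vset h.shape hr1 hc1 true, hsgood, ?_, by simp, ?_, ?_, by simp, by simp⟩
      · intro p h1 h2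
        rw [hupd p h1 h2]
        by_cases hcnd : p.1 = r ∧ p.2 = c
        · have hp : p = (r, c) := Prod.ext_iff.mpr hcnd
          simp [hp]
        · have hp : p ≠ (r, c) := fun hh => hcnd (Prod.ext_iff.mp hh)
          rw [if_neg hcnd]
          rw [h.markA p h1 h2]
          simp [hp]
      · intro p hp
        have : p = (r, c) := by simpa using hp
        subst this
        exact hnM
      · intro p hp
        have : p = (r, c) := by simpa using hp
        subst this
        exact Relation.ReflTransGen.refl
    obtain ⟨hshA, hmarkA, hnodupA, hreachA⟩ :=
      floodA land {p | ∃ K ∈ stB.2, p ∈ K} (r, c) [(r, c)] (vset stA.1 r c true) [] hinvA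
    have hinvB : FloodInvB land {p | ∃ K ∈ stB.2, p ∈ K} (r, c) [(r, c)]
        (stB.1.insert (r, c) (stB.2.length : Int)) [] := by
      refine ⟨hsgood, ?_, by simp, ?_, ?_, by simp, by simp⟩
      · intro p
        rw [PySem.Dict.contains_insert]
        simp only [Bool.or_eq_true, beq_iff_eq, h.markB p]
        constructor
        · rintro (hp | hp)
          · exact Or.inr (Or.inr (by simp [hp]))
          · exact Or.inl hp
        · rintro (hp | hp | hp)
          · exact Or.inr hp
          · simp at hp
          · exact Or.inl (by simpa using hp)
      · intro p hp
        have : p = (r, c) := by simpa using hp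
        subst this
        exact hnM
      · intro p hp
        have : p = (r, c) := by simpa using hp
        subst this
        exact Relation.ReflTransGen.refl
    obtain ⟨hmarkB, hnodupB, hreachB⟩ :=
      floodB land {p | ∃ K ∈ stB.2, p ∈ K} (r, c) (stB.2.length : Int) [(r, c)]
        (stB.1.insert (r, c) (stB.2.length : Int)) [] hinvB
    set cells := (dfsLoop land (land.length : Int) ((PySem.List.pyGetD land 0 []).length : Int)
      (stB.2.length : Int) [(r, c)] (stB.1.insert (r, c) (stB.2.length : Int)) []).2 with hcellsdef
    have hbfsA : bfsA land r c stA.1 stA.2.1 stA.2.2 =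
        ((bfsLoop land [(r, c)] (vset stA.1 r c true) []).1,
          (bfsLoop land [(r, c)] (vset stA.1 r c true) []).2.foldl
            (fun t p => t.insert p
              (((bfsLoop land [(r, c)] (vset stA.1 r c true) []).2.length : Int), stA.2.2))
            stA.2.1) := rfl
    have hsame : ∀ x, x ∈ (bfsLoop land [(r, c)] (vset stA.1 r c true) []).2 ↔ x ∈ cells :=
      fun x => (hreachA x).trans (hreachB x).symm
    have hperm := (List.perm_ext_iff_of_nodup hnodupA hnodupB).mpr hsame
    have hlen := hperm.length_eq
    have hcellsgood : ∀ x ∈ cells, Good land x :=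
      fun x hx => reach_good hsgood ((hreachB x).mp hx)
    have hcellsnotM : ∀ x ∈ cells, ¬ ∃ K ∈ stB.2, x ∈ K :=
      fun x hx => reach_notM hnM ((hreachB x).mp hx)
    refine ⟨?_, ?_, ?_, ?_, ?_, ?_, ?_, ?_⟩
    · rw [hbfsA]; exact hshA
    · intro K hK
      rcases List.mem_append.mp hK with hK' | hK'
      · exact h.knodup K hK'
      · have : K = cells := by simpa using hK'
        rw [this]; exact hnodupB
    · intro K hK
      rcases List.mem_append.mp hK with hK' | hK'
      · exact h.kgood K hK'
      · have hKeq : K = cells := by simpa using hK'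
        rw [hKeq]; exact hcellsgood
    · intro p h1 h2
      rw [hbfsA]
      rw [hmarkA p h1 h2]
      simp only [Set.mem_setOf_eq, List.mem_append, List.mem_singleton]
      constructor
      · rintro (⟨K, hK, hpK⟩ | hp)
        · exact ⟨K, Or.inl hK, hpK⟩
        · exact ⟨cells, Or.inr rfl, (hsame p).mp hp⟩
      · rintro ⟨K, hK | hK, hpK⟩
        · exact Or.inl ⟨K, hK, hpK⟩
        · exact Or.inr ((hsame p).mpr (hK ▸ hpK))
    · intro p
      rw [hmarkB p]
      simp only [Set.mem_setOf_eq, List.mem_append, List.mem_singleton]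
      constructor
      · rintro (⟨K, hK, hpK⟩ | hp)
        · exact ⟨K, Or.inl hK, hpK⟩
        · exact ⟨cells, Or.inr rfl, hp⟩
      · rintro ⟨K, hK | hK, hpK⟩
        · exact Or.inl ⟨K, hK, hpK⟩
        · exact Or.inr (hK ▸ hpK)
    · intro K hK p hp y hnb hgood
      rcases List.mem_append.mp hK with hK' | hK'
      · obtain ⟨L, hL, hyL⟩ := h.kclosed K hK' p hp y hnb hgood
        exact ⟨L, List.mem_append_left _ hL, hyL⟩
      · have hKeq : K = cells := by simpa using hK'
        subst hKeq
        by_cases hyM : ∃ L ∈ stB.2, y ∈ L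
        · obtain ⟨L, hL, hyL⟩ := hyM
          exact ⟨L, List.mem_append_left _ hL, hyL⟩
        · refine ⟨cells, List.mem_append_right _ (by simp), ?_⟩
          exact (hreachB y).mpr (((hreachB p).mp hp).tail ⟨hnb, hgood, hyM⟩)
    · simp only [List.length_append, List.length_singleton]
      rw [h.hflag]
      push_cast
      ring
    · intro p v
      rw [hbfsA]
      simp only []
      rw [dict_get?_foldl_insert]
      rw [tagged_append]
      by_cases hmem : p ∈ (bfsLoop land [(r, c)] (vset stA.1 r c true) []).2
      · rw [if_pos hmem]
        have hpcells := (hsame p).mp hmem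
        have hpnot : ¬ ∃ Ki ∈ tagged stB.2 1, p ∈ Ki.1 := by
          rintro ⟨Ki, hKi, hpKi⟩
          exact hcellsnotM p hpcells ⟨Ki.1, mem_tagged stB.2 1 Ki hKi, hpKi⟩
        constructor
        · intro hv
          refine ⟨(cells, 1 + (stB.2.length : Int)), List.mem_append_right _ (by simp), hpcells, ?_⟩
          have hveq : v = (((bfsLoop land [(r, c)] (vset stA.1 r c true) []).2.length : Int),
              stA.2.2) := by
            injection hv with hv'
            exact hv'.symm
          rw [hveq, h.hflag, hlen]
          exact Prod.ext_iff.mpr ⟨rfl, by ring⟩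
        · rintro ⟨Ki, hKi, hpKi, hveq⟩
          rcases List.mem_append.mp hKi with hKi' | hKi'
          · exact absurd ⟨Ki, hKi', hpKi⟩ hpnot
          · have hKieq : Ki = (cells, 1 + (stB.2.length : Int)) := by simpa using hKi'
            subst hKieq
            simp only at hveq
            rw [hveq, h.hflag, hlen]
            exact congrArg some (Prod.ext_iff.mpr ⟨rfl, by ring⟩)
      · rw [if_neg hmem]
        rw [h.htable p v]
        constructor
        · rintro ⟨Ki, hKi, hpKi, hveq⟩
          exact ⟨Ki, List.mem_append_left _ hKi, hpKi, hveq⟩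
        · rintro ⟨Ki, hKi, hpKi, hveq⟩
          rcases List.mem_append.mp hKi with hKi' | hKi'
          · exact ⟨Ki, hKi', hpKi, hveq⟩
          · have hKieq : Ki = (cells, 1 + (stB.2.length : Int)) := by simpa using hKi'
            subst hKieq
            simp only at hpKi
            exact absurd ((hsame p).mpr hpKi) hmem
  · rw [if_neg hg, if_neg (fun hb => hg (hguard.mpr hb))]
    exact h

-- ---- initial states and the whole scan ----

theorem vget_replicate_ne_true (nR nC : Nat) (x y : Int) (hx : 0 ≤ x) (hy : 0 ≤ y) :
    vget (List.replicate nR (List.replicate nC false)) x y ≠ some true := by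
  rw [vget_nonneg _ hx hy]
  intro ht
  by_cases hxR : x.toNat < nR
  · simp only [List.getElem?_replicate, hxR, if_true, Option.bind_some] at ht
    by_cases hyC : y.toNat < nC
    · simp [hyC] at ht
    · simp [hyC] at ht
  · simp [hxR] at ht

theorem outer_init (land : List (List Int)) :
    OuterInv land
      ((PySem.List.pyRange 0 (land.length : Int)).map
          (fun _ => (PySem.List.pyRange 0 ((PySem.List.pyGetD land 0 []).length : Int)).map
            (fun _ => false)),
        (PySem.Dict.empty : PySem.Dict (Int × Int) (Int × Int)), (1 : Int))
      ((PySem.Dict.empty : PySem.Dict (Int × Int) Int), ([] : List (List (Int × Int)))) := by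
  have hvis0 : (PySem.List.pyRange 0 (land.length : Int)).map
      (fun _ => (PySem.List.pyRange 0 ((PySem.List.pyGetD land 0 []).length : Int)).map
        (fun _ => false))
      = List.replicate land.length (List.replicate (PySem.List.pyGetD land 0 []).length false) := by
    simp [PySem.List.length_pyRange_one]
  rw [hvis0]
  refine ⟨⟨?_, ?_⟩, ?_, ?_, ?_, ?_, ?_, ?_, ?_⟩
  · simp
  · intro row hrow
    rw [List.eq_of_mem_replicate hrow]
    simp
  · intro K hK; simp at hK
  · intro K hK; simp at hK
  · intro p h1 h2
    constructor
    · intro ht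
      exact absurd ht (vget_replicate_ne_true _ _ _ _ h1 h2)
    · rintro ⟨K, hK, _⟩
      simp at hK
  · intro p
    rw [show (PySem.Dict.empty : PySem.Dict (Int × Int) Int).contains p = false from rfl]
    simp
  · intro K hK; simp at hK
  · simp
  · intro p v
    rw [show (PySem.Dict.empty : PySem.Dict (Int × Int) (Int × Int)).get? p = none from rfl]
    simp [tagged]

theorem outer_final (land : List (List Int)) :
    OuterInv land
      ((PySem.List.pyRange 0 (land.length : Int)).foldl (fun st r =>
        (PySem.List.pyRange 0 ((PySem.List.pyGetD land 0 []).length : Int)).foldl (fun st c =>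
          if vget st.1 r c = some false ∧ landAt land r c ≠ 0 then
            ((bfsA land r c st.1 st.2.1 st.2.2).1, (bfsA land r c st.1 st.2.1 st.2.2).2,
              st.2.2 + 1)
          else st) st)
        ((PySem.List.pyRange 0 (land.length : Int)).map
          (fun _ => (PySem.List.pyRange 0 ((PySem.List.pyGetD land 0 []).length : Int)).map
            (fun _ => false)),
          (PySem.Dict.empty : PySem.Dict (Int × Int) (Int × Int)), (1 : Int)))
      ((PySem.List.pyRange 0 (land.length : Int)).foldl (fun st r =>
        (PySem.List.pyRange 0 ((PySem.List.pyGetD land 0 []).length : Int)).foldl (fun st c =>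
          if landB land (r, c) ≠ 0 ∧ st.1.contains (r, c) = false then
            ((dfsLoop land (land.length : Int) ((PySem.List.pyGetD land 0 []).length : Int)
                (st.2.length : Int) [(r, c)] (st.1.insert (r, c) (st.2.length : Int)) []).1,
              st.2 ++ [(dfsLoop land (land.length : Int)
                ((PySem.List.pyGetD land 0 []).length : Int) (st.2.length : Int) [(r, c)]
                (st.1.insert (r, c) (st.2.length : Int)) []).2])
          else st) st)
        ((PySem.Dict.empty : PySem.Dict (Int × Int) Int), ([] : List (List (Int × Int))))) := by
  refine foldl_pair_inv _ _ _ (OuterInv land) ?_ _ _ (outer_init land)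
  intro a b r hr hab
  refine foldl_pair_inv _ _ _ (OuterInv land) ?_ a b hab
  intro a' b' c hc hab'
  have hrb := PySem.List.mem_pyRange_one.mp hr
  have hcb := PySem.List.mem_pyRange_one.mp hc
  exact outer_step land r c hrb.1 hrb.2 hcb.1 hcb.2 a' b' hab'

-- ---- the aggregation phase: per-column sums agree ----

theorem seen_fold (table : PySem.Dict (Int × Int) (Int × Int)) (c : Int) (rs : List Int) :
    ∀ s₀ : PySem.Set (Int × Int), s₀.Nodup →
      (rs.foldl (fun seen r =>
        match table.get? (r, c) with
        | some v => if v ∈ seen then seen else PySem.Set.add seen v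
        | none => seen) s₀).Nodup ∧
      (∀ v, v ∈ rs.foldl (fun seen r =>
        match table.get? (r, c) with
        | some v => if v ∈ seen then seen else PySem.Set.add seen v
        | none => seen) s₀ ↔ (v ∈ s₀ ∨ ∃ r ∈ rs, table.get? (r, c) = some v)) := by
  induction rs with
  | nil => intro s₀ h; exact ⟨h, fun v => by simp⟩
  | cons r rs' ih =>
    intro s₀ h
    simp only [List.foldl_cons]
    rcases hg : table.get? (r, c) with _ | v0
    · obtain ⟨h1, h2⟩ := ih s₀ h
      refine ⟨h1, fun v => ?_⟩
      rw [h2 v]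
      constructor
      · rintro (hv | ⟨r', hr', hv⟩)
        · exact Or.inl hv
        · exact Or.inr ⟨r', List.mem_cons_of_mem _ hr', hv⟩
      · rintro (hv | ⟨r', hr', hv⟩)
        · exact Or.inl hv
        · rcases List.mem_cons.mp hr' with rfl | hr''
          · rw [hg] at hv; cases hv
          · exact Or.inr ⟨r', hr'', hv⟩
    · simp only []
      by_cases hv0 : v0 ∈ s₀
      · rw [if_pos hv0]
        obtain ⟨h1, h2⟩ := ih s₀ h
        refine ⟨h1, fun v => ?_⟩
        rw [h2 v]
        constructor
        · rintro (hv | ⟨r', hr', hv⟩)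
          · exact Or.inl hv
          · exact Or.inr ⟨r', List.mem_cons_of_mem _ hr', hv⟩
        · rintro (hv | ⟨r', hr', hv⟩)
          · exact Or.inl hv
          · rcases List.mem_cons.mp hr' with rfl | hr''
            · rw [hg] at hv
              injection hv with hv'
              exact Or.inl (hv' ▸ hv0)
            · exact Or.inr ⟨r', hr'', hv⟩
      · rw [if_neg hv0, PySem.Set.add_of_not_mem hv0]
        obtain ⟨h1, h2⟩ := ih (s₀ ++ [v0])
          (List.Nodup.append h (List.nodup_singleton v0)
            (fun a ha hb => hv0 ((List.mem_singleton.mp hb) ▸ ha)))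
        refine ⟨h1, fun v => ?_⟩
        rw [h2 v]
        simp only [List.mem_append, List.mem_cons, List.not_mem_nil, or_false]
        constructor
        · rintro ((hv | rfl) | ⟨r', hr', hv⟩)
          · exact Or.inl hv
          · exact Or.inr ⟨r, Or.inl rfl, hg⟩
          · exact Or.inr ⟨r', Or.inr hr', hv⟩
        · rintro (hv | ⟨r', hr' | hr', hv⟩)
          · exact Or.inl (Or.inl hv)
          · subst hr'
            rw [hg] at hv
            injection hv with hv'
            exact Or.inl (Or.inr hv'.symm)
          · exact Or.inr ⟨r', hr', hv⟩

theorem sumA_col (land : List (List Int))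
    (stA : List (List Bool) × PySem.Dict (Int × Int) (Int × Int) × Int)
    (stB : PySem.Dict (Int × Int) Int × List (List (Int × Int)))
    (h : OuterInv land stA stB) (c : Int) :
    (((PySem.List.pyRange 0 (land.length : Int)).foldl (fun seen r =>
        match stA.2.1.get? (r, c) with
        | some v => if v ∈ seen then seen else PySem.Set.add seen v
        | none => seen) (PySem.Set.empty : PySem.Set (Int × Int))).map Prod.fst).sum
      = ((stB.2.filter (fun K => decide (∃ p ∈ K, p.2 = c))).map
          (fun K => (K.length : Int))).sum := by
  obtain ⟨hnodup, hmem⟩ := seen_fold stA.2.1 c (PySem.List.pyRange 0 (land.length : Int))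
    (PySem.Set.empty : PySem.Set (Int × Int)) List.nodup_nil
  have hmem' : ∀ v, v ∈ (PySem.List.pyRange 0 (land.length : Int)).foldl (fun seen r =>
      match stA.2.1.get? (r, c) with
      | some v => if v ∈ seen then seen else PySem.Set.add seen v
      | none => seen) (PySem.Set.empty : PySem.Set (Int × Int)) ↔
      ∃ Ki ∈ tagged stB.2 1, (∃ p ∈ Ki.1, p.2 = c) ∧ v = ((Ki.1.length : Int), Ki.2) := by
    intro v
    rw [hmem v]
    simp only [PySem.Set.empty, List.not_mem_nil, false_or]
    constructor
    · rintro ⟨r, hr, hg⟩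
      obtain ⟨Ki, hKi, hpKi, hveq⟩ := (h.htable (r, c) v).mp hg
      exact ⟨Ki, hKi, ⟨(r, c), hpKi, rfl⟩, hveq⟩
    · rintro ⟨Ki, hKi, ⟨p, hp, hpc⟩, hveq⟩
      have hgood := h.kgood Ki.1 (mem_tagged _ _ Ki hKi) p hp
      refine ⟨p.1, PySem.List.mem_pyRange_one.mpr ⟨hgood.1, hgood.2.1⟩, ?_⟩
      have hpeq : (p.1, c) = p := by rw [← hpc]
      rw [hpeq]
      exact (h.htable p v).mpr ⟨Ki, hKi, hp, hveq⟩
  have hLCmem : ∀ v, v ∈ ((tagged stB.2 1).filter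
      (fun Ki => decide (∃ p ∈ Ki.1, p.2 = c))).map
        (fun Ki => ((Ki.1.length : Int), Ki.2)) ↔
      ∃ Ki ∈ tagged stB.2 1, (∃ p ∈ Ki.1, p.2 = c) ∧ v = ((Ki.1.length : Int), Ki.2) := by
    intro v
    simp only [List.mem_map, List.mem_filter, decide_eq_true_eq]
    constructor
    · rintro ⟨Ki, ⟨hKi, hpred⟩, hveq⟩
      exact ⟨Ki, hKi, hpred, hveq.symm⟩
    · rintro ⟨Ki, hKi, hpred, hveq⟩
      exact ⟨Ki, ⟨hKi, hpred⟩, hveq.symm⟩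
  have hLCnodup : (((tagged stB.2 1).filter
      (fun Ki => decide (∃ p ∈ Ki.1, p.2 = c))).map
        (fun Ki => ((Ki.1.length : Int), Ki.2))).Nodup := by
    apply List.Nodup.of_map Prod.snd
    rw [List.map_map]
    have hsub : ((tagged stB.2 1).filter
        (fun Ki => decide (∃ p ∈ Ki.1, p.2 = c))).Sublist (tagged stB.2 1) :=
      List.filter_sublist
    have hpw : ((tagged stB.2 1).filter
        (fun Ki => decide (∃ p ∈ Ki.1, p.2 = c))).Pairwise (fun a b => a.2 < b.2) :=
      (tagged_snd_lt stB.2 1).sublist hsub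
    have : (((tagged stB.2 1).filter
        (fun Ki => decide (∃ p ∈ Ki.1, p.2 = c))).map
          (Prod.snd ∘ fun Ki => ((Ki.1.length : Int), Ki.2))).Pairwise (· < ·) :=
      List.pairwise_map.mpr hpw
    exact this.imp (fun hlt => ne_of_lt hlt)
  have hperm := (List.perm_ext_iff_of_nodup hnodup hLCnodup).mpr
    (fun v => (hmem' v).trans (hLCmem v).symm)
  rw [(hperm.map Prod.fst).sum_eq]
  rw [List.map_map]
  exact congrArg List.sum
    (tagged_filter_map (fun K => decide (∃ p ∈ K, p.2 = c)) (fun K => (K.length : Int)) stB.2 1)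

theorem colUpd_len (size : Int) (cols' : List Int) :
    ∀ ct : List Int, (cols'.foldl (fun ct c =>
      PySem.List.pySetD ct c (PySem.List.pyGetD ct c 0 + size)) ct).length = ct.length := by
  induction cols' with
  | nil => intro ct; rfl
  | cons c' rest ih =>
    intro ct
    rw [List.foldl_cons, ih, PySem.List.length_pySetD]

theorem colUpd (size : Int) (cols' : List Int) :
    ∀ (ct : List Int) (j : Nat), j < ct.length → cols'.Nodup →
      (∀ c' ∈ cols', 0 ≤ c' ∧ c' < (ct.length : Int)) →
      PySem.List.pyGetD (cols'.foldl (fun ct c =>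
        PySem.List.pySetD ct c (PySem.List.pyGetD ct c 0 + size)) ct) (j : Int) 0
      = PySem.List.pyGetD ct (j : Int) 0 + (if (j : Int) ∈ cols' then size else 0) := by
  induction cols' with
  | nil => intro ct j _ _ _; simp
  | cons c' rest ih =>
    intro ct j hj hnd hbnd
    obtain ⟨hc1, hc2⟩ := hbnd c' (by simp)
    obtain ⟨n, rfl⟩ : ∃ n : Nat, c' = (n : Int) := ⟨c'.toNat, (Int.toNat_of_nonneg hc1).symm⟩
    have hnlt : n < ct.length := by omega
    rw [List.foldl_cons]
    rw [ih (PySem.List.pySetD ct (n : Int) (PySem.List.pyGetD ct (n : Int) 0 + size)) j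
      (by rw [PySem.List.length_pySetD]; exact hj) (List.Nodup.of_cons hnd)
      (fun c'' hc'' => by
        rw [PySem.List.length_pySetD]
        exact hbnd c'' (List.mem_cons_of_mem _ hc''))]
    rw [PySem.List.pyGetD_pySetD_natCast ct n j _ 0 hnlt]
    by_cases hjn : j = n
    · subst hjn
      have hjrest : (j : Int) ∉ rest := by
        have := List.nodup_cons.mp hnd
        exact this.1
      simp [hjrest]
    · rw [if_neg hjn]
      have : ((j : Int) ∈ (n : Int) :: rest) ↔ ((j : Int) ∈ rest) := by
        simp only [List.mem_cons]
        constructor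
        · rintro (h | h)
          · exfalso; exact hjn (by exact_mod_cast h)
          · exact h
        · exact Or.inr
      rw [if_congr this rfl rfl]

theorem colTotal_len (KS : List (List (Int × Int))) :
    ∀ ct : List Int, (KS.foldl (fun ct cells =>
      (PySem.Set.ofList (cells.map Prod.snd)).foldl
        (fun ct c => PySem.List.pySetD ct c (PySem.List.pyGetD ct c 0 + (cells.length : Int)))
        ct) ct).length = ct.length := by
  induction KS with
  | nil => intro ct; rfl
  | cons K rest ih =>
    intro ct
    rw [List.foldl_cons, ih, colUpd_len]

theorem colTotal_val (land : List (List Int)) (KS : List (List (Int × Int)))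
    (hgood : ∀ K ∈ KS, ∀ p ∈ K, Good land p) :
    ∀ ct : List Int, ct.length = (PySem.List.pyGetD land 0 []).length → ∀ j : Nat, j < ct.length →
      PySem.List.pyGetD (KS.foldl (fun ct cells =>
        (PySem.Set.ofList (cells.map Prod.snd)).foldl
          (fun ct c => PySem.List.pySetD ct c (PySem.List.pyGetD ct c 0 + (cells.length : Int)))
          ct) ct) (j : Int) 0
      = PySem.List.pyGetD ct (j : Int) 0 +
        ((KS.filter (fun K => decide (∃ p ∈ K, p.2 = (j : Int)))).map
          (fun K => (K.length : Int))).sum := by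
  induction KS with
  | nil => intro ct _ j _; simp
  | cons K rest ih =>
    intro ct hlen j hj
    rw [List.foldl_cons]
    rw [ih (fun K' hK' => hgood K' (List.mem_cons_of_mem _ hK'))
      _ (by rw [colUpd_len]; exact hlen) j (by rw [colUpd_len]; exact hj)]
    rw [colUpd (K.length : Int) (PySem.Set.ofList (K.map Prod.snd)) ct j hj
      (PySem.Set.nodup_ofList _)
      (fun c' hc' => by
        rw [PySem.Set.mem_ofList] at hc'
        obtain ⟨p, hp, hpc⟩ := List.mem_map.mp hc'
        have := hgood K (by simp) p hp
        rw [← hpc]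
        rw [hlen]
        exact ⟨this.2.2.1, this.2.2.2.1⟩)]
    have hmemiff : ((j : Int) ∈ PySem.Set.ofList (K.map Prod.snd)) ↔
        (∃ p ∈ K, p.2 = (j : Int)) := by
      rw [PySem.Set.mem_ofList]
      simp [List.mem_map]
    rw [List.filter_cons]
    by_cases htouch : ∃ p ∈ K, p.2 = (j : Int)
    · rw [if_pos (hmemiff.mpr htouch),
        if_pos (show decide (∃ p ∈ K, p.2 = (j : Int)) = true by simpa using htouch)]
      simp only [List.map_cons, List.sum_cons]
      ring
    · rw [if_neg (fun hmem => htouch (hmemiff.mp hmem)),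
        if_neg (show ¬ decide (∃ p ∈ K, p.2 = (j : Int)) = true by simpa using htouch)]
      ring

theorem max_fold_eq (f : Int → Int) (hf : ∀ x, 0 ≤ f x) (C : Int) (ct : List Int)
    (hlen : ct.length = C.toNat)
    (hval : ∀ j : Nat, j < ct.length → PySem.List.pyGetD ct (j : Int) 0 = f (j : Int)) :
    (PySem.List.pyRange 0 C).foldl (fun a c => max (f c) a) 0 =
      (match PySem.List.max? ct (fun x => x) with | some m => m | none => 0) := by
  have hcteq : ct = (PySem.List.pyRange 0 C).map f := by
    apply List.ext_getElem
    · simp [PySem.List.length_pyRange_one, hlen]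
    · intro k h1 h2
      have hg : PySem.List.pyGetD ct (k : Int) 0 = ct[k] := by
        rw [PySem.List.pyGetD_of_nonneg _ _ (by positivity)]
        simp [List.getD, List.getElem?_eq_getElem h1]
      rw [← hg, hval k h1]
      simp only [List.getElem_map, PySem.List.getElem_pyRange_one]
      norm_num
  subst hcteq
  rcases hrange : PySem.List.pyRange 0 C with _ | ⟨x, t⟩
  · simp [PySem.List.max?]
  · rw [List.map_cons, PySem.List.max?_id_cons]
    simp only []
    rw [List.foldl_cons]
    have hx0 : max (f x) 0 = f x := max_eq_left (hf x)
    rw [hx0]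
    have hcomm : (fun (a : Int) (c : Int) => max (f c) a) = fun a c => max a (f c) := by
      funext a c
      exact max_comm _ _
    rw [hcomm, ← List.foldl_map]

theorem agg_eq (land : List (List Int))
    (stA : List (List Bool) × PySem.Dict (Int × Int) (Int × Int) × Int)
    (stB : PySem.Dict (Int × Int) Int × List (List (Int × Int)))
    (h : OuterInv land stA stB) :
    (PySem.List.pyRange 0 ((PySem.List.pyGetD land 0 []).length : Int)).foldl (fun answer c =>
      max ((((PySem.List.pyRange 0 (land.length : Int)).foldl (fun seen r =>
        match stA.2.1.get? (r, c) with
        | some v => if v ∈ seen then seen else PySem.Set.add seen v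
        | none => seen) (PySem.Set.empty : PySem.Set (Int × Int))).map Prod.fst).sum) answer) 0
    = (match PySem.List.max? (stB.2.foldl (fun ct cells =>
        (PySem.Set.ofList (cells.map Prod.snd)).foldl
          (fun ct c => PySem.List.pySetD ct c (PySem.List.pyGetD ct c 0 + (cells.length : Int)))
          ct)
        (PySem.List.pyRepeat [(0 : Int)] ((PySem.List.pyGetD land 0 []).length : Int)))
        (fun x => x) with
       | some m => m
       | none => 0) := by
  have hcongr :
      (PySem.List.pyRange 0 ((PySem.List.pyGetD land 0 []).length : Int)).foldl (fun answer c =>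
        max ((((PySem.List.pyRange 0 (land.length : Int)).foldl (fun seen r =>
          match stA.2.1.get? (r, c) with
          | some v => if v ∈ seen then seen else PySem.Set.add seen v
          | none => seen) (PySem.Set.empty : PySem.Set (Int × Int))).map Prod.fst).sum) answer) 0
      = (PySem.List.pyRange 0 ((PySem.List.pyGetD land 0 []).length : Int)).foldl (fun answer c =>
        max (((stB.2.filter (fun K => decide (∃ p ∈ K, p.2 = c))).map
          (fun K => (K.length : Int))).sum) answer) 0 :=
    PySem.List.foldl_congr_mem _ _ _ _ (fun acc c _ => by rw [sumA_col land stA stB h c])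
  rw [hcongr]
  have hrep : PySem.List.pyRepeat [(0 : Int)] ((PySem.List.pyGetD land 0 []).length : Int)
      = List.replicate (PySem.List.pyGetD land 0 []).length (0 : Int) := by
    rw [PySem.List.pyRepeat_singleton]
    simp
  apply max_fold_eq
  · intro x
    apply List.sum_nonneg
    intro v hv
    obtain ⟨K, _, hKeq⟩ := List.mem_map.mp hv
    rw [← hKeq]
    positivity
  · rw [colTotal_len, hrep]
    simp
  · intro j hj
    rw [colTotal_len, hrep] at hj
    rw [colTotal_val land stB.2 h.kgood _ (by rw [hrep]; simp) j (by rw [hrep]; simpa using hj)]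
    rw [hrep]
    rw [PySem.List.pyGetD_of_nonneg _ _ (by positivity)]
    rw [List.getD_eq_getElem _ _ (by simpa using hj)]
    simp

theorem solution_eq_alt (land : List (List Int)) : solution land = solution_alt land := by
  simp only [solution, solution_alt]
  exact agg_eq land _ _ (outer_final land)

-- ===== VERDICT (by name: the statement is the Claim_ definition above) =====
theorem solution_spec : Claim_equal_solution := by
  unfold Claim_equal_solution
  intro land _ _
  unfold Spec_solution
  exact solution_eq_alt land
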